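-- pv_equiv track=rewrite | github.com/skyWalker1997/TrafficDataProcesser | UP_DOWN_DATA_PROCESSER/data_process.py | up_down_count
-- ===== SOURCE A (Python) =====
-- def up_down_count(day_timeslot_dict):
--     up_count = 0
--     down_count = 0
--     for k in day_timeslot_dict:
--         if k['u_d'] == 'down':
--             down_count+=1
--         else:
--             up_count+=1
--     return up_count,down_count
-- ===== SOURCE B (Python) =====
-- def up_down_count(day_timeslot_dict):
--     n = len(day_timeslot_dict)
--     if n == 0:
--         return 0, 0
--     if n == 1:
--         return (0, 1) if day_timeslot_dict[0]['u_d'] == 'down' else (1, 0)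
--     mid = n // 2
--     lu, ld = up_down_count(day_timeslot_dict[:mid])
--     ru, rd = up_down_count(day_timeslot_dict[mid:])
--     return lu + ru, ld + rd
-- ===== Notes on version B (the rewrite author's own statement) =====
-- stated objective: alternative
-- what changed: Replaces A's single accumulator loop with divide-and-conquer recursion: split the list in halves, recurse to single-entry base cases, and add the (up, down) pairs of the halves.
import Mathlib
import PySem

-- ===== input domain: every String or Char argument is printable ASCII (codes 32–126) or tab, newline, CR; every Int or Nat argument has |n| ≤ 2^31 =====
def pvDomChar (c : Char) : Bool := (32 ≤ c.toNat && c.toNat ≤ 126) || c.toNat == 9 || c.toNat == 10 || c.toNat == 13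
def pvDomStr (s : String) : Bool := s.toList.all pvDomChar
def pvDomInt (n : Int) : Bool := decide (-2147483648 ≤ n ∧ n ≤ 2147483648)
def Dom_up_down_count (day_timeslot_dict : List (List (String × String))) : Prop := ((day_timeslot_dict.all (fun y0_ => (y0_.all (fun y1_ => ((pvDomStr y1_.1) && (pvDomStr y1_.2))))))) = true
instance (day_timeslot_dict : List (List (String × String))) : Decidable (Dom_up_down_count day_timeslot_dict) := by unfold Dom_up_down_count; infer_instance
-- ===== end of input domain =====

-- B replaces A's accumulator loop with divide-and-conquer recursion on list halves (alternative decomposition, same results).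


-- ===== PORT A =====
-- A: loop over the entries keeping two counters, branching on k['u_d'] == 'down'.
def up_down_count (day_timeslot_dict : List (List (String × String))) : Int × Int :=
  day_timeslot_dict.foldl
    (fun (acc : Int × Int) k =>
      if (PySem.Dict.ofList k).get? "u_d" == some "down" then (acc.1, acc.2 + 1)
      else (acc.1 + 1, acc.2))
    (0, 0)

-- ===== PORT B =====
-- B: divide and conquer — split in halves, recurse, add the pairs.
-- n // 2 on a Nat length is exactly Python's floor division for nonnegative n;
-- day_timeslot_dict[0] is in range at the n = 1 leaf, so getD [] is never taken.
def up_down_count_alt (day_timeslot_dict : List (List (String × String))) : Int × Int :=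
  if day_timeslot_dict.length = 0 then (0, 0)
  else if day_timeslot_dict.length = 1 then
    if (PySem.Dict.ofList ((PySem.List.pyGet? day_timeslot_dict 0).getD [])).get? "u_d" == some "down"
    then (0, 1) else (1, 0)
  else
    let mid := day_timeslot_dict.length / 2
    let l := up_down_count_alt (PySem.List.slice day_timeslot_dict none (some (mid : Int)))
    let r := up_down_count_alt (PySem.List.slice day_timeslot_dict (some (mid : Int)) none)
    (l.1 + r.1, l.2 + r.2)
termination_by day_timeslot_dict.length
decreasing_by
  · rw [PySem.List.slice_to_natCast]; simp [List.length_take]; omega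
  · rw [PySem.List.slice_from_natCast]; simp [List.length_drop]; omega

-- ===== PRECONDITION & SPEC =====
-- Pre_ excludes exactly the inputs on which Python A raises KeyError (an entry without key 'u_d'); B raises there too.
def Pre_up_down_count (day_timeslot_dict : List (List (String × String))) : Prop :=
  (day_timeslot_dict.all (fun k => (PySem.Dict.ofList k).contains "u_d")) = true
instance (day_timeslot_dict : List (List (String × String))) : Decidable (Pre_up_down_count day_timeslot_dict) := by unfold Pre_up_down_count; infer_instance
def pvWitness_up_down_count : (List (List (String × String))) := [[("u_d", "down")], [("u_d", "up")]]

def Spec_up_down_count (day_timeslot_dict : List (List (String × String))) (out : Int × Int) : Prop := out = up_down_count_alt day_timeslot_dict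
instance (day_timeslot_dict : List (List (String × String))) (out : Int × Int) : Decidable (Spec_up_down_count day_timeslot_dict out) := by unfold Spec_up_down_count; infer_instance

-- ===== CLAIM (what is proved, stated in full; the proofs are below) =====
def Claim_equal_up_down_count : Prop := ∀ (day_timeslot_dict : List (List (String × String))), Dom_up_down_count day_timeslot_dict → Pre_up_down_count day_timeslot_dict → Spec_up_down_count day_timeslot_dict (up_down_count day_timeslot_dict)

-- ===== LEMMAS AND PROOFS =====
-- abbreviation for the 'is down' test
def pvIsDown (k : List (String × String)) : Bool :=
  (PySem.Dict.ofList k).get? "u_d" == some "down"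

theorem up_down_foldl (l : List (List (String × String))) (u d : Int) :
    l.foldl
      (fun (acc : Int × Int) k =>
        if (PySem.Dict.ofList k).get? "u_d" == some "down" then (acc.1, acc.2 + 1)
        else (acc.1 + 1, acc.2))
      (u, d)
    = (u + ((l.length : Int) - (l.countP pvIsDown : Nat)),
       d + (l.countP pvIsDown : Nat)) := by
  induction l generalizing u d with
  | nil => simp
  | cons h t ih =>
    simp only [List.foldl_cons, List.countP_cons, List.length_cons]
    by_cases hc : ((PySem.Dict.ofList h).get? "u_d" == some "down") = true
    · rw [if_pos hc, ih]
      simp [hc, pvIsDown]; ring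
    · rw [if_neg hc, ih]
      simp [hc, pvIsDown]; ring

set_option maxRecDepth 4000 in
theorem alt_closed : ∀ (n : Nat) (l : List (List (String × String))), l.length = n →
    up_down_count_alt l = (((l.length : Int) - ((l.countP pvIsDown : Nat) : Int)), ((l.countP pvIsDown : Nat) : Int)) := by
  intro n
  induction n using Nat.strong_induction_on with
  | _ n ih =>
    intro l hl
    rw [up_down_count_alt]
    by_cases h0 : l.length = 0
    · rcases List.length_eq_zero_iff.mp h0 with rfl
      simp
    · rw [if_neg h0]
      by_cases h1 : l.length = 1
      · rcases List.length_eq_one_iff.mp h1 with ⟨e, rfl⟩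
        rw [if_pos h1]
        by_cases hc : ((PySem.Dict.ofList e).get? "u_d" == some "down") = true
        · simp [PySem.List.pyGet?, PySem.List.pyIdx?, hc, pvIsDown]
        · simp [PySem.List.pyGet?, PySem.List.pyIdx?, hc, pvIsDown]
      · rw [if_neg h1]
        have hmidlt : (l.take (l.length / 2)).length < n := by
          simp [List.length_take]; omega
        have hdroplt : (l.drop (l.length / 2)).length < n := by
          simp [List.length_drop]; omega
        have ihl := ih _ hmidlt (l.take (l.length / 2)) rfl
        have ihr := ih _ hdroplt (l.drop (l.length / 2)) rfl
        simp only [PySem.List.slice_to_natCast, PySem.List.slice_from_natCast, ihl, ihr]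
        have hcnt : (l.take (l.length / 2)).countP pvIsDown + (l.drop (l.length / 2)).countP pvIsDown = l.countP pvIsDown := by
          conv_rhs => rw [← List.take_append_drop (l.length / 2) l]
          rw [List.countP_append]
        have hlen : (l.take (l.length / 2)).length + (l.drop (l.length / 2)).length = l.length := by
          conv_rhs => rw [← List.take_append_drop (l.length / 2) l]
          rw [List.length_append]
        rw [Prod.mk.injEq]
        constructor <;> omega

-- ===== VERDICT (by name: the statement is the Claim_ definition above) =====
theorem up_down_count_spec : Claim_equal_up_down_count := by
  intro l _ _
  unfold Spec_up_down_count up_down_count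
  rw [up_down_foldl, alt_closed l.length l rfl]
  simp
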